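-- pv_equiv track=rewrite | github.com/Patxi91/CodeWars_Cloud | 6kyu-Maximum Overlap of Two Images-Patxi.py | max_overlap
-- ===== SOURCE A (Python) =====
-- def max_overlap(img1, img2):
--     n = len(img1)  # Number of rows
--     m = len(img1[0])  # Number of columns
--
--     max_overlap = 0
--
--     # Iterate through all possible shifts
--     for shift_i in range(-n + 1, n):
--         for shift_j in range(-m + 1, m):
--             overlap_count = 0
--
--             # Iterate through the pixels of both images
--             for i in range(n):
--                 for j in range(m):
--                     # Calculate the corresponding indices after shifting
--                     img1_i = i + shift_i
--                     img1_j = j + shift_j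
--
--                     # Check if both indices are within bounds
--                     if 0 <= img1_i < n and 0 <= img1_j < m:
--                         # Check if both pixels are black
--                         if img1[img1_i][img1_j] == 1 and img2[i][j] == 1:
--                             overlap_count += 1
--
--             # Update max_overlap if current overlap is greater
--             max_overlap = max(max_overlap, overlap_count)
--
--     return max_overlap
-- ===== SOURCE B (Python) =====
-- def max_overlap(img1, img2):
--     n = len(img1)
--     m = len(img1[0])
--     ones1 = [(a, b) for a in range(n) for b in range(m) if img1[a][b] == 1]
--     ones2 = [(i, j) for i in range(n) for j in range(m) if img2[i][j] == 1]
--     shifts = [(a - i, b - j) for (i, j) in ones2 for (a, b) in ones1]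
--     counts = {}
--     for s in shifts:
--         counts[s] = counts.get(s, 0) + 1
--     return max(counts.values(), default=0)
-- ===== Notes on version B (the rewrite author's own statement) =====
-- stated objective: faster
-- what changed: Instead of scanning every pixel pair for every one of the (2n-1)(2m-1) shifts, B lists the black pixels of both images once, tallies the shift vector of every black-pixel pair in a dictionary, and returns the largest tally (0 if none).
-- outside the precondition, e.g. on max_overlap([[0]], [[]]): A returns 0, B raises IndexError; on max_overlap([[-1, 181]], [[-2], [-1], [4]]): A returns 0, B raises IndexError
import Mathlib
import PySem

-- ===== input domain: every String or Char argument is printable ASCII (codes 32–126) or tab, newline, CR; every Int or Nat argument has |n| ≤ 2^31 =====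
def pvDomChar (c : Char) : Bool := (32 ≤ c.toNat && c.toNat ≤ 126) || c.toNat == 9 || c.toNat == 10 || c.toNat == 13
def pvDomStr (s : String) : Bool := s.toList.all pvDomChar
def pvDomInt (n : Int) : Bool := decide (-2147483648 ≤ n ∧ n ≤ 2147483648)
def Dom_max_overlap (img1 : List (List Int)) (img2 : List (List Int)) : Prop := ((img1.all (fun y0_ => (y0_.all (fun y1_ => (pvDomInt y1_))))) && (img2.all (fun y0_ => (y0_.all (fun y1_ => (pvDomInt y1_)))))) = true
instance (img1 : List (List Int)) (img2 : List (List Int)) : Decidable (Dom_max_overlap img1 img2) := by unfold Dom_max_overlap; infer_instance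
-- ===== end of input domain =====

-- B replaces A's scan of every pixel pair for every shift by one tally of the shift vectors of
-- black-pixel pairs in a dictionary (objective: faster by a constant factor; measured by the check).

-- ===== PORT A =====
-- shared indexing helper: img[i][j] (indices are in range under Pre_)
def pvGet2 (img : List (List Int)) (i j : Int) : Int :=
  PySem.List.pyGetD (PySem.List.pyGetD img i []) j 0

def max_overlap (img1 : List (List Int)) (img2 : List (List Int)) : Int :=
  let n : Int := img1.length
  let m : Int := (img1.headD []).length
  (PySem.List.pyRange (-n + 1) n 1).foldl (fun acc shift_i =>
    (PySem.List.pyRange (-m + 1) m 1).foldl (fun acc shift_j =>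
      let overlap_count : Int :=
        (PySem.List.pyRange 0 n 1).foldl (fun c i =>
          (PySem.List.pyRange 0 m 1).foldl (fun c j =>
            let img1_i := i + shift_i
            let img1_j := j + shift_j
            if 0 ≤ img1_i ∧ img1_i < n ∧ 0 ≤ img1_j ∧ img1_j < m then
              if pvGet2 img1 img1_i img1_j == 1 && pvGet2 img2 i j == 1 then c + 1 else c
            else c) c) 0
      max acc overlap_count) acc) 0

-- ===== PORT B =====
-- B-side helper: the black pixels [(a, b) for a in range(n) for b in range(m) if img[a][b] == 1]
def pvOnes (img : List (List Int)) (n m : Int) : List (Int × Int) :=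
  (PySem.List.pyRange 0 n 1).flatMap (fun a =>
    ((PySem.List.pyRange 0 m 1).filter (fun b => pvGet2 img a b == 1)).map (fun b => (a, b)))

def max_overlap_alt (img1 : List (List Int)) (img2 : List (List Int)) : Int :=
  let n : Int := img1.length
  let m : Int := (img1.headD []).length
  let ones1 := pvOnes img1 n m
  let ones2 := pvOnes img2 n m
  let shifts := ones2.flatMap (fun q => ones1.map (fun p => (p.1 - q.1, p.2 - q.2)))
  let counts := shifts.foldl (fun d s => d.insert s (d.getD s 0 + 1)) PySem.Dict.empty
  PySem.List.maxD counts.values (fun v => v) 0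

-- ===== PRECONDITION & SPEC =====
-- Pre_ requires img1 nonempty, every img1 row at least m = len(img1[0]) long, and (when m > 0) img2
-- complete on its first n×m block; it excludes inputs where indexing raises, plus the corner where
-- img2 is incomplete but img1 has no black pixel: there A's short-circuiting `and` never reads img2
-- and returns 0, while B, which scans each image once up front, raises IndexError.
def Pre_max_overlap (img1 : List (List Int)) (img2 : List (List Int)) : Prop :=
  img1 ≠ [] ∧
  (∀ r ∈ img1, (img1.headD []).length ≤ r.length) ∧
  ((img1.headD []).length = 0 ∨
    (img1.length ≤ img2.length ∧
     ∀ r ∈ img2.take img1.length, (img1.headD []).length ≤ r.length))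
instance (img1 : List (List Int)) (img2 : List (List Int)) : Decidable (Pre_max_overlap img1 img2) := by
  unfold Pre_max_overlap; infer_instance

def pvWitness_max_overlap : List (List Int) × List (List Int) := ([[1]], [[1]])

def Spec_max_overlap (img1 : List (List Int)) (img2 : List (List Int)) (out : Int) : Prop := out = max_overlap_alt img1 img2
instance (img1 : List (List Int)) (img2 : List (List Int)) (out : Int) : Decidable (Spec_max_overlap img1 img2 out) := by unfold Spec_max_overlap; infer_instance

-- ===== CLAIM (what is proved, stated in full; the proofs are below) =====
def Claim_equal_max_overlap : Prop := ∀ (img1 : List (List Int)) (img2 : List (List Int)), Dom_max_overlap img1 img2 → Pre_max_overlap img1 img2 → Spec_max_overlap img1 img2 (max_overlap img1 img2)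

-- ===== LEMMAS AND PROOFS =====

theorem pv_mem_pvOnes (img : List (List Int)) (n m : Int) (x : Int × Int) :
    x ∈ pvOnes img n m ↔ 0 ≤ x.1 ∧ x.1 < n ∧ 0 ≤ x.2 ∧ x.2 < m ∧ pvGet2 img x.1 x.2 = 1 := by
  obtain ⟨a, b⟩ := x
  simp [pvOnes, PySem.List.mem_pyRange_one]
  tauto

theorem pv_ones_eq_filter (img : List (List Int)) (n m : Int) :
    pvOnes img n m =
      (PySem.List.pyRange 0 n 1 ×ˢ PySem.List.pyRange 0 m 1).filter
        (fun x => pvGet2 img x.1 x.2 == 1) := by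
  rw [show (PySem.List.pyRange 0 n 1 ×ˢ PySem.List.pyRange 0 m 1) =
        (PySem.List.pyRange 0 n 1).flatMap (fun a => (PySem.List.pyRange 0 m 1).map (fun b => (a, b)))
      from rfl]
  simp [pvOnes, List.filter_flatMap, List.filter_map, Function.comp_def]

theorem pv_nodup_pvOnes (img : List (List Int)) (n m : Int) : (pvOnes img n m).Nodup := by
  rw [pv_ones_eq_filter]
  exact List.Nodup.filter _
    (List.Nodup.product (PySem.List.nodup_pyRange_one 0 n) (PySem.List.nodup_pyRange_one 0 m))

-- my upper-bound companion to PySem.List.le_foldl_max_int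
theorem pv_foldl_max_le {β : Type} (f : β → Int) (r : Int) :
    ∀ (l : List β) (a : Int), a ≤ r → (∀ x ∈ l, f x ≤ r) →
      l.foldl (fun acc y => max acc (f y)) a ≤ r := by
  intro l
  induction l with
  | nil => intro a h1 _; exact h1
  | cons x t ih =>
      intro a h1 h2
      exact ih _ (max_le h1 (h2 x (by simp))) (fun y hy => h2 y (by simp [hy]))

-- A's inner double loop for a fixed shift counts the black-pixel pairs with that shift vector
theorem pv_cnt_eq (img1 img2 : List (List Int)) (n m s1 s2 : Int) :
    ((PySem.List.pyRange 0 n 1).foldl (fun c i =>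
        (PySem.List.pyRange 0 m 1).foldl (fun c j =>
          let img1_i := i + s1
          let img1_j := j + s2
          if 0 ≤ img1_i ∧ img1_i < n ∧ 0 ≤ img1_j ∧ img1_j < m then
            if pvGet2 img1 img1_i img1_j == 1 && pvGet2 img2 i j == 1 then c + 1 else c
          else c) c) (0 : Int)) =
      (((pvOnes img2 n m).flatMap (fun q =>
          (pvOnes img1 n m).map (fun p => (p.1 - q.1, p.2 - q.2)))).count (s1, s2) : Int) := by
  have hnd1 := pv_nodup_pvOnes img1 n m
  have hgrid : ((PySem.List.pyRange 0 n 1).foldl (fun c i =>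
        (PySem.List.pyRange 0 m 1).foldl (fun c j =>
          let img1_i := i + s1
          let img1_j := j + s2
          if 0 ≤ img1_i ∧ img1_i < n ∧ 0 ≤ img1_j ∧ img1_j < m then
            if pvGet2 img1 img1_i img1_j == 1 && pvGet2 img2 i j == 1 then c + 1 else c
          else c) c) (0 : Int)) =
      ((PySem.List.pyRange 0 n 1 ×ˢ PySem.List.pyRange 0 m 1).foldl (fun c x =>
          if 0 ≤ x.1 + s1 ∧ x.1 + s1 < n ∧ 0 ≤ x.2 + s2 ∧ x.2 + s2 < m ∧
             pvGet2 img1 (x.1 + s1) (x.2 + s2) = 1 ∧ pvGet2 img2 x.1 x.2 = 1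
          then c + 1 else c) 0) := by
    rw [show (PySem.List.pyRange 0 n 1 ×ˢ PySem.List.pyRange 0 m 1) =
          (PySem.List.pyRange 0 n 1).flatMap (fun a => (PySem.List.pyRange 0 m 1).map (fun b => (a, b)))
        from rfl, List.foldl_flatMap]
    simp only [List.foldl_map]
    apply PySem.List.foldl_congr_mem
    intro c i _
    apply PySem.List.foldl_congr_mem
    intro c' j _
    show (if 0 ≤ i + s1 ∧ i + s1 < n ∧ 0 ≤ j + s2 ∧ j + s2 < m then
            if pvGet2 img1 (i + s1) (j + s2) == 1 && pvGet2 img2 i j == 1 then c' + 1 else c'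
          else c') =
        (if 0 ≤ i + s1 ∧ i + s1 < n ∧ 0 ≤ j + s2 ∧ j + s2 < m ∧
            pvGet2 img1 (i + s1) (j + s2) = 1 ∧ pvGet2 img2 i j = 1 then c' + 1 else c')
    split_ifs with hb hp hq <;> simp_all
  rw [hgrid, PySem.List.foldl_ite_add_one
    (fun x : Int × Int => 0 ≤ x.1 + s1 ∧ x.1 + s1 < n ∧ 0 ≤ x.2 + s2 ∧ x.2 + s2 < m ∧
      pvGet2 img1 (x.1 + s1) (x.2 + s2) = 1 ∧ pvGet2 img2 x.1 x.2 = 1)]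
  rw [zero_add, Nat.cast_inj]
  have step1 : (PySem.List.pyRange 0 n 1 ×ˢ PySem.List.pyRange 0 m 1).countP
      (fun x => decide (0 ≤ x.1 + s1 ∧ x.1 + s1 < n ∧ 0 ≤ x.2 + s2 ∧ x.2 + s2 < m ∧
        pvGet2 img1 (x.1 + s1) (x.2 + s2) = 1 ∧ pvGet2 img2 x.1 x.2 = 1)) =
      (pvOnes img2 n m).countP (fun q => decide ((q.1 + s1, q.2 + s2) ∈ pvOnes img1 n m)) := by
    rw [pv_ones_eq_filter img2, List.countP_filter]
    apply List.countP_congr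
    intro x _
    simp [pv_mem_pvOnes]
    tauto
  rw [step1, List.count_flatMap]
  have step2 : ∀ q : Int × Int,
      ((pvOnes img1 n m).map (fun p => (p.1 - q.1, p.2 - q.2))).count (s1, s2) =
        if (q.1 + s1, q.2 + s2) ∈ pvOnes img1 n m then 1 else 0 := by
    intro q
    rw [List.count_eq_countP, List.countP_map]
    have heq : ((pvOnes img1 n m).countP
          ((fun x => x == (s1, s2)) ∘ (fun p => (p.1 - q.1, p.2 - q.2)))) =
        (pvOnes img1 n m).countP (fun p => p == (q.1 + s1, q.2 + s2)) := by
      apply List.countP_congr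
      intro p _
      simp [Function.comp, Prod.ext_iff]
      omega
    rw [heq, ← List.count_eq_countP]
    split_ifs with hm
    · exact List.count_eq_one_of_mem hnd1 hm
    · exact List.count_eq_zero.mpr hm
  have hmap : ((pvOnes img2 n m).map
        (List.count (s1, s2) ∘ fun q => (pvOnes img1 n m).map (fun p => (p.1 - q.1, p.2 - q.2)))).sum =
      ((pvOnes img2 n m).map
        (fun q => if decide ((q.1 + s1, q.2 + s2) ∈ pvOnes img1 n m) then 1 else 0)).sum := by
    congr 1
    apply List.map_congr_left
    intro q _
    simp only [Function.comp, step2]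
    split_ifs <;> simp_all
  rw [hmap, PySem.List.sum_map_ite_one_zero_nat]

-- a shift vector of a black-pixel pair lies in A's shift grid
theorem pv_shift_mem (img1 img2 : List (List Int)) (n m : Int) (s : Int × Int)
    (hs : s ∈ (pvOnes img2 n m).flatMap (fun q =>
          (pvOnes img1 n m).map (fun p => (p.1 - q.1, p.2 - q.2)))) :
    s ∈ PySem.List.pyRange (-n + 1) n 1 ×ˢ PySem.List.pyRange (-m + 1) m 1 := by
  simp only [List.mem_flatMap, List.mem_map] at hs
  obtain ⟨q, hq, p, hp, rfl⟩ := hs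
  rw [pv_mem_pvOnes] at hq hp
  rw [List.mem_product]
  constructor <;> rw [PySem.List.mem_pyRange_one] <;> omega

-- maxD over a list of nonnegative values, bounded both ways
theorem pv_maxD_ub (V : List Int) : ∀ y ∈ V, y ≤ PySem.List.maxD V (fun v => v) 0 := by
  intro y hy
  cases V with
  | nil => simp at hy
  | cons v vs =>
      show y ≤ (PySem.List.max? (v :: vs) (fun v => v)).getD 0
      rw [PySem.List.max?_id_cons]
      rcases List.mem_cons.mp hy with rfl | hmem
      · exact (PySem.List.le_foldl_max vs y).1
      · exact (PySem.List.le_foldl_max vs v).2 y hmem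

theorem pv_maxD_nn (V : List Int) (h : ∀ y ∈ V, 0 ≤ y) : 0 ≤ PySem.List.maxD V (fun v => v) 0 := by
  cases V with
  | nil => exact le_refl 0
  | cons v vs => exact le_trans (h v (by simp)) (pv_maxD_ub (v :: vs) v (by simp))

theorem pv_maxD_le (V : List Int) (r : Int) (h0 : 0 ≤ r) (h : ∀ y ∈ V, y ≤ r) :
    PySem.List.maxD V (fun v => v) 0 ≤ r := by
  cases V with
  | nil => exact h0
  | cons v vs =>
      show (PySem.List.max? (v :: vs) (fun v => v)).getD 0 ≤ r
      rw [PySem.List.max?_id_cons]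
      exact pv_foldl_max_le (fun y => y) r vs v (h v (by simp)) (fun y hy => h y (by simp [hy]))

-- the common value: running max over the shift grid of the pair count
theorem pv_max_eq (img1 img2 : List (List Int)) (n m : Int) :
    ((PySem.List.pyRange (-n + 1) n 1 ×ˢ PySem.List.pyRange (-m + 1) m 1).foldl
        (fun acc s => max acc
          (((pvOnes img2 n m).flatMap (fun q =>
              (pvOnes img1 n m).map (fun p => (p.1 - q.1, p.2 - q.2)))).count s : Int)) 0) =
      PySem.List.maxD
        ((PySem.Set.ofList ((pvOnes img2 n m).flatMap (fun q =>
            (pvOnes img1 n m).map (fun p => (p.1 - q.1, p.2 - q.2))))).map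
          (fun k => (((pvOnes img2 n m).flatMap (fun q =>
              (pvOnes img1 n m).map (fun p => (p.1 - q.1, p.2 - q.2)))).count k : Int)))
        (fun v => v) 0 := by
  set T := (pvOnes img2 n m).flatMap (fun q =>
      (pvOnes img1 n m).map (fun p => (p.1 - q.1, p.2 - q.2))) with hT
  set SG := PySem.List.pyRange (-n + 1) n 1 ×ˢ PySem.List.pyRange (-m + 1) m 1 with hSG
  set V := (PySem.Set.ofList T).map (fun k => ((T.count k : Nat) : Int)) with hV
  have hVnn : ∀ y ∈ V, 0 ≤ y := by
    intro y hy
    rw [hV, List.mem_map] at hy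
    obtain ⟨k, _, rfl⟩ := hy
    positivity
  have hA : ∀ y ∈ V, y ≤ SG.foldl (fun acc s => max acc ((T.count s : Nat) : Int)) 0 := by
    intro y hy
    rw [hV, List.mem_map] at hy
    obtain ⟨k, hk, rfl⟩ := hy
    have hkT : k ∈ T := (PySem.Set.mem_ofList T k).mp hk
    have hkSG : k ∈ SG := pv_shift_mem img1 img2 n m k (hT ▸ hkT)
    exact (PySem.List.le_foldl_max_int SG (fun s => ((T.count s : Nat) : Int)) 0).2 k hkSG
  apply le_antisymm
  · apply pv_foldl_max_le _ _ SG 0 (pv_maxD_nn V hVnn)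
    intro s _
    by_cases hsT : s ∈ T
    · exact pv_maxD_ub V _
        (by rw [hV]; exact List.mem_map.mpr ⟨s, (PySem.Set.mem_ofList T s).mpr hsT, rfl⟩)
    · rw [List.count_eq_zero.mpr hsT]
      simpa using pv_maxD_nn V hVnn
  · exact pv_maxD_le V _ (PySem.List.le_foldl_max_int SG _ 0).1 hA

theorem pv_A_eq (img1 img2 : List (List Int)) :
    max_overlap img1 img2 =
      (PySem.List.pyRange (-(img1.length : Int) + 1) (img1.length : Int) 1 ×ˢ
        PySem.List.pyRange (-((img1.headD []).length : Int) + 1) ((img1.headD []).length : Int) 1).foldl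
        (fun acc s => max acc
          ((((pvOnes img2 (img1.length : Int) ((img1.headD []).length : Int)).flatMap (fun q =>
              (pvOnes img1 (img1.length : Int) ((img1.headD []).length : Int)).map
                (fun p => (p.1 - q.1, p.2 - q.2)))).count s : Nat) : Int)) 0 := by
  rw [show (PySem.List.pyRange (-(img1.length : Int) + 1) (img1.length : Int) 1 ×ˢ
        PySem.List.pyRange (-((img1.headD []).length : Int) + 1) ((img1.headD []).length : Int) 1) =
      (PySem.List.pyRange (-(img1.length : Int) + 1) (img1.length : Int) 1).flatMap
        (fun a => (PySem.List.pyRange (-((img1.headD []).length : Int) + 1)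
            ((img1.headD []).length : Int) 1).map (fun b => (a, b)))
      from rfl, List.foldl_flatMap]
  simp only [List.foldl_map]
  show (PySem.List.pyRange _ _ 1).foldl _ 0 = _
  apply PySem.List.foldl_congr_mem
  intro acc si _
  apply PySem.List.foldl_congr_mem
  intro acc' sj _
  exact congrArg (max acc') (pv_cnt_eq img1 img2 _ _ si sj)

theorem pv_B_eq (img1 img2 : List (List Int)) :
    max_overlap_alt img1 img2 =
      PySem.List.maxD
        ((PySem.Set.ofList ((pvOnes img2 (img1.length : Int) ((img1.headD []).length : Int)).flatMap
            (fun q => (pvOnes img1 (img1.length : Int) ((img1.headD []).length : Int)).map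
              (fun p => (p.1 - q.1, p.2 - q.2))))).map
          (fun k => ((((pvOnes img2 (img1.length : Int) ((img1.headD []).length : Int)).flatMap
              (fun q => (pvOnes img1 (img1.length : Int) ((img1.headD []).length : Int)).map
                (fun p => (p.1 - q.1, p.2 - q.2)))).count k : Nat) : Int)))
        (fun v => v) 0 := by
  show PySem.List.maxD (List.foldl _ PySem.Dict.empty _).values (fun v => v) 0 = _
  rw [PySem.Dict.foldl_insert_getD_add_one_eq_counter]
  congr 1
  show (PySem.Dict.counter _).items.map (fun p => p.2) = _
  rw [PySem.Dict.items_counter, List.map_map]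
  rfl

-- ===== VERDICT (by name: the statement is the Claim_ definition above) =====
theorem max_overlap_spec : Claim_equal_max_overlap := by
  intro img1 img2 _ _
  unfold Spec_max_overlap
  rw [pv_A_eq, pv_B_eq, pv_max_eq]
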